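-- pv_equiv track=rewrite | github.com/zhijianzhu/atop | src/newsService.py | filter_news
-- ===== SOURCE A (Python) =====
-- def filter_news(news_list):
--     # removing duplicated titles, only remain the latest one
--     if not news_list:
--         return None
--
--     news_list = sorted(
--         news_list,
--         key=lambda a: a['publishedAt'] +
--         a['title'],
--         reverse=True)
--
--     ret = {}
--
--     for n in news_list:
--         if n['title'] not in ret:
--             ret[n['title']] = n
--
--     return [v for k, v in ret.items()]
-- ===== SOURCE B (Python) =====
-- def filter_news(news_list):
--     # One pass keeping, per title, the entry with the largest (publishedAt+title, earliest index);
--     # then sort only the deduplicated entries instead of the whole list.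
--     if not news_list:
--         return None
--     best = {}
--     for i, n in enumerate(news_list):
--         t = n['title']
--         k = n['publishedAt'] + n['title']
--         cur = best.get(t)
--         if cur is None or k > cur[0]:
--             best[t] = (k, i, n)
--     kept = sorted(best.values(), key=lambda p: p[1])
--     kept = sorted(kept, key=lambda p: p[0], reverse=True)
--     return [p[2] for p in kept]
-- ===== Notes on version B (the rewrite author's own statement) =====
-- stated objective: alternative
-- what changed: Instead of sorting the whole list descending and keeping the first entry per title, B makes one linear pass keeping per title the entry with the largest publishedAt+title key (earliest index on ties) in a dict, and then sorts only the deduplicated entries by (key desc, index asc).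
import Mathlib
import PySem

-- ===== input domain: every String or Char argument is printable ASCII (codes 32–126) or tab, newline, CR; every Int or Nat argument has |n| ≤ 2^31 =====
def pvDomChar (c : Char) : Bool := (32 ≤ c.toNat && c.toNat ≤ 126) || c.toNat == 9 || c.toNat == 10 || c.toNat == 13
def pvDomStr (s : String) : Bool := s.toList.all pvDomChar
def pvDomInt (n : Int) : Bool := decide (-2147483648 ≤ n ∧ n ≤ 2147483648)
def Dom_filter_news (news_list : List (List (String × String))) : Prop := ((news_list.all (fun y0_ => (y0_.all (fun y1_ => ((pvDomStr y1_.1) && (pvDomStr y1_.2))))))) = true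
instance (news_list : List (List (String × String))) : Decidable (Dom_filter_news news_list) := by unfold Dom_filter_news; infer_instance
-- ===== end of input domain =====

-- B (filter_news_alt) replaces A's sort-everything-then-keep-first-per-title by a single pass
-- keeping per title the entry with the largest publishedAt+title key (earliest index on ties),
-- then sorting only the deduplicated entries — an alternative algorithm, same exact result.

-- ===== PORT A =====
-- dict item lookup n[k] (first match in the association list); the "" default is unreachable
-- under Pre_filter_news, which requires the 'title'/'publishedAt' keys (Python raises KeyError otherwise).
def pvGetStr (n : List (String × String)) (k : String) : String :=
  ((n.find? (fun p => p.1 == k)).map (fun p => p.2)).getD ""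

def pvTitle (n : List (String × String)) : String := pvGetStr n "title"

-- the sort key a['publishedAt'] + a['title']: string concatenation and comparison ported on
-- List Char (exact: Python orders strings lexicographically by code point, as List Char's order does)
def pvKey (n : List (String × String)) : List Char :=
  (pvGetStr n "publishedAt").toList ++ (pvGetStr n "title").toList

def filter_news (news_list : List (List (String × String))) : Option (List (List (String × String))) :=
  if news_list = [] then none
  else
    let sorted_list := PySem.List.sorted news_list (fun a => pvKey a) true
    let ret := sorted_list.foldl
      (fun (d : PySem.Dict String (List (String × String))) n =>
        if d.contains (pvTitle n) then d else d.insert (pvTitle n) n)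
      PySem.Dict.empty
    some (ret.items.map (fun p => p.2))

-- ===== PORT B =====
def filter_news_alt (news_list : List (List (String × String))) : Option (List (List (String × String))) :=
  if news_list = [] then none
  else
    let best := (PySem.List.enumerate news_list).foldl
      (fun (d : PySem.Dict String (List Char × Int × List (String × String))) p =>
        match d.get? (pvTitle p.2) with
        | none => d.insert (pvTitle p.2) (pvKey p.2, p.1, p.2)
        | some cur => if cur.1 < pvKey p.2 then d.insert (pvTitle p.2) (pvKey p.2, p.1, p.2) else d)
      PySem.Dict.empty
    let kept := PySem.List.sorted (PySem.List.sorted best.values (fun p => p.2.1) false)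
      (fun p => p.1) true
    some (kept.map (fun p => p.2.2))

-- ===== PRECONDITION & SPEC =====
-- Pre_ excludes exactly the inputs where some entry lacks the 'title' or 'publishedAt' key,
-- on which Python A (and B) raise KeyError.
def Pre_filter_news (news_list : List (List (String × String))) : Prop :=
  (news_list.all (fun n => (n.find? (fun p => p.1 == "title")).isSome
                        && (n.find? (fun p => p.1 == "publishedAt")).isSome)) = true

instance (news_list : List (List (String × String))) : Decidable (Pre_filter_news news_list) := by
  unfold Pre_filter_news; infer_instance

def pvWitness_filter_news : (List (List (String × String))) :=
  [[("title", "a"), ("publishedAt", "2020")], [("publishedAt", "2019"), ("title", "a")]]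

def Spec_filter_news (news_list : List (List (String × String))) (out : Option (List (List (String × String)))) : Prop := out = filter_news_alt news_list
instance (news_list : List (List (String × String))) (out : Option (List (List (String × String)))) : Decidable (Spec_filter_news news_list out) := by unfold Spec_filter_news; infer_instance

-- ===== CLAIM (what is proved, stated in full; the proofs are below) =====
def Claim_equal_filter_news : Prop := ∀ (news_list : List (List (String × String))), Dom_filter_news news_list → Pre_filter_news news_list → Spec_filter_news news_list (filter_news news_list)

-- ===== LEMMAS AND PROOFS =====

-- ---- definitions used only by the proofs ----

-- "a beats b" in a stable reverse sort: strictly larger key, or equal key and earlier index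
def pvBeats {β κ : Type} [LT κ] (key : β → κ) (idx : β → Int) (a b : β) : Prop :=
  key b < key a ∨ (key a = key b ∧ idx a < idx b)

-- A's dedup loop, abstractly: keep the first element of each title not yet seen
def pvPick {β : Type} (t : β → String) (seen : List String) : List β → List β
  | [] => []
  | x :: xs => if seen.contains (t x) then pvPick t seen xs else x :: pvPick t (seen ++ [t x]) xs

-- B's per-title accumulator, restricted to one title T
def pvStepT (T : String) (acc : Option (List Char × Int × List (String × String)))
    (p : Int × List (String × String)) : Option (List Char × Int × List (String × String)) :=
  if pvTitle p.2 = T then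
    match acc with
    | none => some (pvKey p.2, p.1, p.2)
    | some c => if c.1 < pvKey p.2 then some (pvKey p.2, p.1, p.2) else acc
  else acc

def pvBestOf (xs : List (Int × List (String × String))) (T : String) :
    Option (List Char × Int × List (String × String)) :=
  xs.foldl (pvStepT T) none

def pvEmb (p : Int × List (String × String)) : List Char × Int × List (String × String) :=
  (pvKey p.2, p.1, p.2)

-- the winner of p's title group: beats every other element with the same title
def pvWinner (p : Int × List (String × String)) (xs : List (Int × List (String × String))) : Prop :=
  p ∈ xs ∧ ∀ q ∈ xs, pvTitle q.2 = pvTitle p.2 →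
    q = p ∨ pvBeats (fun z => pvKey z.2) (fun z => z.1) p q

lemma pvBeats_asymm {β κ : Type} [LinearOrder κ] (key : β → κ) (idx : β → Int) (a b : β)
    (h1 : pvBeats key idx a b) (h2 : pvBeats key idx b a) : False := by
  rcases h1 with h1 | ⟨h1, h1'⟩ <;> rcases h2 with h2 | ⟨h2, h2'⟩
  · exact absurd (h1.trans h2) (lt_irrefl _)
  · exact absurd h1 (h2 ▸ lt_irrefl _)
  · exact absurd h2 (h1 ▸ lt_irrefl _)
  · omega

lemma pvWinner_unique (p p' : Int × List (String × String))
    (xs : List (Int × List (String × String))) (hp : pvWinner p xs) (hp' : pvWinner p' xs)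
    (ht : pvTitle p.2 = pvTitle p'.2) : p = p' := by
  rcases hp.2 p' hp'.1 ht.symm with h | h
  · exact h.symm
  rcases hp'.2 p hp.1 ht with h' | h'
  · exact h'
  exact absurd h' (fun h' => pvBeats_asymm _ _ _ _ h h')

-- pvWinner only depends on xs up to permutation
lemma pvWinner_perm {xs ys : List (Int × List (String × String))} (h : xs.Perm ys)
    (p : Int × List (String × String)) (hw : pvWinner p xs) : pvWinner p ys :=
  ⟨h.mem_iff.1 hw.1, fun q hq => hw.2 q (h.mem_iff.2 hq)⟩

-- pvPick commutes with mapping out a component the title only looks through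
lemma pick_map {β γ : Type} (t : γ → String) (f : β → γ) : ∀ (es : List β) (seen : List String),
    pvPick t seen (es.map f) = (pvPick (fun p => t (f p)) seen es).map f := by
  intro es
  induction es with
  | nil => intro seen; simp [pvPick]
  | cons x es IH =>
    intro seen
    rw [List.map_cons, pvPick, pvPick]
    split
    · exact IH seen
    · rw [List.map_cons, IH]

lemma insertBy_stable {β κ : Type} [LinearOrder κ] [DecidableLT κ] (key : β → κ) (idx : β → Int) (x : β) :
    ∀ (acc : List β), acc.Pairwise (pvBeats key idx) → (∀ y ∈ acc, idx y < idx x) →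
    (PySem.List.insertBy (fun a b => decide (key b < key a)) x acc).Pairwise (pvBeats key idx) := by
  intro acc
  induction acc with
  | nil => intro _ _; simp [PySem.List.insertBy]
  | cons y t IH =>
    intro hpw hidx
    rw [List.pairwise_cons] at hpw
    obtain ⟨hy, hpt⟩ := hpw
    by_cases hb : key y < key x
    · simp only [PySem.List.insertBy, hb, decide_true, if_true]
      refine List.Pairwise.cons ?_ (List.Pairwise.cons hy hpt)
      intro z hz
      rcases List.mem_cons.1 hz with rfl | hz
      · exact Or.inl hb
      · rcases hy z hz with h | ⟨h, _⟩
        · exact Or.inl (h.trans hb)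
        · exact Or.inl (h ▸ hb)
    · simp only [PySem.List.insertBy, hb, decide_false]
      refine List.Pairwise.cons ?_ (IH hpt (fun z hz => hidx z (List.mem_cons_of_mem _ hz)))
      intro z hz
      rcases (PySem.List.mem_insertBy _ _ _ _).1 hz with rfl | hz
      · rcases lt_or_eq_of_le (le_of_not_gt hb) with h | h
        · exact Or.inl h
        · exact Or.inr ⟨h.symm, hidx y (List.mem_cons_self ..)⟩
      · exact hy z hz

lemma sorted_rev_stable {β κ : Type} [LinearOrder κ] [DecidableLT κ] (key : β → κ) (idx : β → Int)
    (xs : List β) (h : xs.Pairwise (fun a b => idx a < idx b)) :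
    (PySem.List.sorted xs key true).Pairwise (pvBeats key idx) := by
  rw [PySem.List.sorted_rev_eq_foldl_insertBy]
  suffices H : ∀ (xs : List β) (acc : List β), xs.Pairwise (fun a b => idx a < idx b) →
      acc.Pairwise (pvBeats key idx) → (∀ y ∈ acc, ∀ x ∈ xs, idx y < idx x) →
      (xs.foldl (fun acc x => PySem.List.insertBy (fun a b => decide (key b < key a)) x acc) acc).Pairwise (pvBeats key idx) by
    exact H xs [] h (List.Pairwise.nil) (by simp)
  intro xs
  induction xs with
  | nil => intro acc _ hacc _; simpa using hacc
  | cons x t IH =>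
    intro acc hxs hacc hlt
    rw [List.pairwise_cons] at hxs
    refine IH _ hxs.2 (insertBy_stable key idx x acc hacc
      (fun y hy => hlt y hy x (List.mem_cons_self ..))) ?_
    intro y hy z hz
    rcases (PySem.List.mem_insertBy _ _ _ _).1 hy with rfl | hy
    · exact hxs.1 z hz
    · exact hlt y hy z (List.mem_cons_of_mem _ hz)

lemma insertBy_map {γ δ κ : Type} [LT κ] [DecidableLT κ] (f : γ → δ) (key : δ → κ) (x : γ) :
    ∀ (acc : List γ),
    (PySem.List.insertBy (fun a b => decide (key (f b) < key (f a))) x acc).map f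
      = PySem.List.insertBy (fun a b => decide (key b < key a)) (f x) (acc.map f) := by
  intro acc
  induction acc with
  | nil => simp [PySem.List.insertBy]
  | cons y t IH =>
    by_cases hb : key (f y) < key (f x)
    · simp [PySem.List.insertBy, hb]
    · simp [PySem.List.insertBy, hb, IH]

lemma sorted_rev_map {γ δ κ : Type} [LT κ] [DecidableLT κ] (f : γ → δ) (key : δ → κ)
    (es : List γ) :
    (PySem.List.sorted es (fun e => key (f e)) true).map f
      = PySem.List.sorted (es.map f) key true := by
  rw [PySem.List.sorted_rev_eq_foldl_insertBy, PySem.List.sorted_rev_eq_foldl_insertBy]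
  suffices H : ∀ (es : List γ) (acc : List γ),
      (es.foldl (fun acc x => PySem.List.insertBy (fun a b => decide (key (f b) < key (f a))) x acc) acc).map f
        = (es.map f).foldl (fun acc x => PySem.List.insertBy (fun a b => decide (key b < key a)) x acc) (acc.map f) by
    simpa using H es []
  intro es
  induction es with
  | nil => simp
  | cons x t IH =>
    intro acc
    simp only [List.foldl_cons, List.map_cons, IH, insertBy_map]

lemma mem_pick_iff {β : Type} (t : β → String) : ∀ (s : List β) (seen : List String) (p : β),
    p ∈ pvPick t seen s ↔
      (t p ∉ seen ∧ s.find? (fun q => t q == t p) = some p) := by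
  intro s
  induction s with
  | nil => intro seen p; simp [pvPick]
  | cons x s IH =>
    intro seen p
    rw [pvPick]
    by_cases hc : t x ∈ seen
    · rw [if_pos (by simpa using hc), IH]
      by_cases hx : t x = t p
      · have hmem : t p ∈ seen := hx ▸ hc
        rw [List.find?_cons_of_pos (by simpa using hx)]
        constructor
        · rintro ⟨h, -⟩; exact absurd hmem h
        · rintro ⟨h, -⟩; exact absurd hmem h
      · rw [List.find?_cons_of_neg (by simpa using hx)]
    · rw [if_neg (by simpa using hc)]
      by_cases hx : t x = t p
      · rw [List.find?_cons_of_pos (by simpa using hx)]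
        simp only [List.mem_cons, IH]
        constructor
        · rintro (rfl | ⟨hcp, _⟩)
          · exact ⟨hx ▸ hc, rfl⟩
          · exfalso; exact hcp (by simp [← hx])
        · rintro ⟨-, hfind⟩
          exact Or.inl (Option.some_injective _ hfind).symm
      · rw [List.find?_cons_of_neg (by simpa using hx)]
        simp only [List.mem_cons, IH, List.mem_append]
        constructor
        · rintro (rfl | ⟨hcp, hf⟩)
          · exact absurd rfl hx
          · exact ⟨fun h => hcp (Or.inl h), hf⟩
        · rintro ⟨hcp, hf⟩
          refine Or.inr ⟨?_, hf⟩
          rintro (h | h)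
          · exact hcp h
          · rcases h with h | h
            · exact hx h.symm
            · exact absurd h (List.not_mem_nil)

lemma pick_map_nodup {β : Type} (t : β → String) : ∀ (s : List β) (seen : List String),
    ((pvPick t seen s).map t).Nodup ∧ ∀ T ∈ (pvPick t seen s).map t, T ∉ seen := by
  intro s
  induction s with
  | nil => intro seen; simp [pvPick]
  | cons x s IH =>
    intro seen
    rw [pvPick]
    by_cases hc : t x ∈ seen
    · rw [if_pos (by simpa using hc)]; exact IH seen
    · rw [if_neg (by simpa using hc)]
      obtain ⟨hnd, hout⟩ := IH (seen ++ [t x])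
      refine ⟨?_, ?_⟩
      · simp only [List.map_cons, List.nodup_cons]
        exact ⟨fun hmem => (hout _ hmem) (by simp), hnd⟩
      · intro T hT
        rcases (List.mem_cons).1 hT with rfl | hT
        · exact hc
        · exact fun h => (hout T hT) (by simp [h])

lemma pick_sublist {β : Type} (t : β → String) : ∀ (s : List β) (seen : List String),
    (pvPick t seen s).Sublist s := by
  intro s
  induction s with
  | nil => intro; simp [pvPick]
  | cons x s IH =>
    intro seen
    rw [pvPick]
    split
    · exact (IH seen).cons x
    · exact (IH (seen ++ [t x])).cons₂ x

lemma foldA_items : ∀ (s : List (List (String × String)))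
    (d : PySem.Dict String (List (String × String))),
    (s.foldl (fun d n => if d.contains (pvTitle n) then d else d.insert (pvTitle n) n) d).items
      = d.items ++ (pvPick pvTitle d.keys s).map (fun n => (pvTitle n, n)) := by
  intro s
  induction s with
  | nil => intro d; simp [pvPick]
  | cons n s IH =>
    intro d
    rw [List.foldl_cons, pvPick]
    by_cases hc : d.contains (pvTitle n) = true
    · have hmem : pvTitle n ∈ d.keys := (PySem.Dict.contains_iff_mem_keys d (pvTitle n)).1 hc
      rw [if_pos hc, if_pos (by simpa using hmem), IH]
    · have hc' : d.contains (pvTitle n) = false := by simpa using hc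
      have hnm : ¬ (pvTitle n ∈ d.keys) :=
        fun hmem => hc ((PySem.Dict.contains_iff_mem_keys d (pvTitle n)).2 hmem)
      rw [if_neg hc, if_neg (by simpa using hnm), IH,
        PySem.Dict.items_insert_of_not_contains d n hc',
        PySem.Dict.keys_insert_of_not_contains d n hc']
      simp

lemma foldB_get? : ∀ (xs : List (Int × List (String × String)))
    (d : PySem.Dict String (List Char × Int × List (String × String))) (T : String),
    (xs.foldl (fun d p =>
        match d.get? (pvTitle p.2) with
        | none => d.insert (pvTitle p.2) (pvKey p.2, p.1, p.2)
        | some cur => if cur.1 < pvKey p.2 then d.insert (pvTitle p.2) (pvKey p.2, p.1, p.2) else d)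
      d).get? T = xs.foldl (pvStepT T) (d.get? T) := by
  intro xs
  induction xs with
  | nil => intro d T; rfl
  | cons p xs IH =>
    intro d T
    rw [List.foldl_cons, List.foldl_cons, IH]
    congr 1
    by_cases ht : pvTitle p.2 = T
    · subst ht
      rcases hg : d.get? (pvTitle p.2) with _ | c
      · dsimp only
        rw [PySem.Dict.get?_insert_self]
        simp [pvStepT]
      · dsimp only
        by_cases hlt : c.1 < pvKey p.2
        · rw [if_pos hlt, PySem.Dict.get?_insert_self]
          simp [pvStepT, hlt]
        · rw [if_neg hlt, hg]
          simp [pvStepT, hlt]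
    · have hne : T ≠ pvTitle p.2 := fun h => ht h.symm
      rcases hg : d.get? (pvTitle p.2) with _ | c
      · dsimp only
        rw [PySem.Dict.get?_insert_of_ne _ _ hne]
        simp [pvStepT, ht]
      · dsimp only
        by_cases hlt : c.1 < pvKey p.2
        · rw [if_pos hlt, PySem.Dict.get?_insert_of_ne _ _ hne]
          simp [pvStepT, ht]
        · rw [if_neg hlt]
          simp [pvStepT, ht]

lemma foldB_keys : ∀ (xs : List (Int × List (String × String)))
    (d : PySem.Dict String (List Char × Int × List (String × String))),
    (xs.foldl (fun d p =>
        match d.get? (pvTitle p.2) with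
        | none => d.insert (pvTitle p.2) (pvKey p.2, p.1, p.2)
        | some cur => if cur.1 < pvKey p.2 then d.insert (pvTitle p.2) (pvKey p.2, p.1, p.2) else d)
      d).keys = PySem.Set.update d.keys (xs.map (fun p => pvTitle p.2)) := by
  intro xs
  induction xs with
  | nil => intro d; simp [PySem.Set.update]
  | cons p xs IH =>
    intro d
    rw [List.foldl_cons, List.map_cons, PySem.Set.update_cons, IH]
    congr 1
    rcases hg : d.get? (pvTitle p.2) with _ | c
    · have hc : d.contains (pvTitle p.2) = false := by
        have := PySem.Dict.contains_eq_isSome_get? d (pvTitle p.2)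
        rw [hg] at this; simpa using this
      have hnm : pvTitle p.2 ∉ d.keys :=
        fun hmem => by simp [(PySem.Dict.contains_iff_mem_keys d (pvTitle p.2)).2 hmem] at hc
      dsimp only
      rw [PySem.Dict.keys_insert_of_not_contains d _ hc, PySem.Set.add,
        if_neg (by simpa using hnm)]
    · have hc : d.contains (pvTitle p.2) = true := by
        have := PySem.Dict.contains_eq_isSome_get? d (pvTitle p.2)
        rw [hg] at this; simpa using this
      have hmem : pvTitle p.2 ∈ d.keys := (PySem.Dict.contains_iff_mem_keys d _).1 hc
      dsimp only
      by_cases hlt : c.1 < pvKey p.2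
      · rw [if_pos hlt, PySem.Dict.keys_insert_of_contains d _ hc, PySem.Set.add,
          if_pos (by simpa using hmem)]
      · rw [if_neg hlt, PySem.Set.add, if_pos (by simpa using hmem)]

lemma bestOf_none (T : String) : ∀ (xs : List (Int × List (String × String))),
    pvBestOf xs T = none → ∀ p ∈ xs, pvTitle p.2 ≠ T := by
  intro xs
  induction xs using List.reverseRecOn with
  | nil => simp
  | append_singleton xs q IH =>
    intro h p hp
    rw [pvBestOf, List.foldl_append, List.foldl_cons, List.foldl_nil] at h
    have hq : pvStepT T (pvBestOf xs T) q = none := h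
    have hxs : pvBestOf xs T = none := by
      by_contra hne
      rcases Option.ne_none_iff_exists'.1 hne with ⟨c, hc⟩
      rw [hc] at hq; simp only [pvStepT] at hq
      by_cases ht : pvTitle q.2 = T
      · rw [if_pos ht] at hq; split at hq <;> simp_all
      · rw [if_neg ht] at hq; simp at hq
    rcases List.mem_append.1 hp with hp | hp
    · exact IH hxs p hp
    · have : p = q := by simpa using hp
      subst this
      rw [hxs] at hq; simp only [pvStepT] at hq
      intro ht
      rw [if_pos ht] at hq
      simp at hq

lemma bestOf_spec (T : String) : ∀ (xs : List (Int × List (String × String))),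
    xs.Pairwise (fun a b => a.1 < b.1) →
    ∀ c, pvBestOf xs T = some c →
      ∃ p, pvWinner p xs ∧ pvTitle p.2 = T ∧ c = pvEmb p := by
  intro xs
  induction xs using List.reverseRecOn with
  | nil => simp [pvBestOf]
  | append_singleton xs q IH =>
    intro hpw c hc
    have hpw' : xs.Pairwise (fun a b => a.1 < b.1) := (List.pairwise_append.1 hpw).1
    have hqlt : ∀ p ∈ xs, p.1 < q.1 := fun p hp =>
      (List.pairwise_append.1 hpw).2.2 p hp q (by simp)
    rw [pvBestOf, List.foldl_append, List.foldl_cons, List.foldl_nil] at hc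
    replace hc : pvStepT T (pvBestOf xs T) q = some c := hc
    by_cases ht : pvTitle q.2 = T
    · rcases hprev : pvBestOf xs T with _ | c0
      · -- q is the only candidate
        rw [hprev] at hc; simp only [pvStepT] at hc; rw [if_pos ht] at hc
        refine ⟨q, ⟨by simp, ?_⟩, ht, by simp at hc; exact hc.symm⟩
        intro r hr htr
        rcases List.mem_append.1 hr with hr | hr
        · exact absurd (htr.trans ht) (bestOf_none T xs hprev r hr)
        · exact Or.inl (by simpa using hr)
      · obtain ⟨p0, hw0, ht0, hemb0⟩ := IH hpw' c0 hprev
        rw [hprev] at hc; simp only [pvStepT] at hc; rw [if_pos ht] at hc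
        by_cases hlt : c0.1 < pvKey q.2
        · rw [if_pos hlt] at hc
          have hc' : c = pvEmb q := by simpa using hc.symm
          refine ⟨q, ⟨by simp, ?_⟩, ht, hc'⟩
          intro r hr htr
          rcases List.mem_append.1 hr with hr | hr
          · -- r in xs with title T: beaten or equal to p0, whose key < key q
            have hk0 : c0.1 = pvKey p0.2 := by rw [hemb0]; rfl
            rw [hk0] at hlt
            rcases hw0.2 r hr (htr.trans (ht.trans ht0.symm)) with rfl | hb
            · exact Or.inr (Or.inl hlt)
            · rcases hb with hb | ⟨hb, -⟩
              · exact Or.inr (Or.inl (hb.trans hlt))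
              · exact Or.inr (Or.inl (by rw [← hb]; exact hlt))
          · exact Or.inl (by simpa using hr)
        · rw [if_neg hlt] at hc
          have hc' : c0 = c := by simpa using hc
          subst hc'
          refine ⟨p0, ⟨List.mem_append.2 (Or.inl hw0.1), ?_⟩, ht0, hemb0⟩
          intro r hr htr
          rcases List.mem_append.1 hr with hr | hr
          · exact hw0.2 r hr htr
          · have hrq : r = q := by simpa using hr
            subst hrq
            have hk0 : c0.1 = pvKey p0.2 := by rw [hemb0]; rfl
            have hle : pvKey r.2 ≤ pvKey p0.2 := by
              rw [← hk0]; exact le_of_not_gt hlt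
            rcases lt_or_eq_of_le hle with h | h
            · exact Or.inr (Or.inl h)
            · exact Or.inr (Or.inr ⟨h.symm, hqlt p0 hw0.1⟩)
    · -- q irrelevant
      simp only [pvStepT] at hc; rw [if_neg ht] at hc
      obtain ⟨p0, hw0, ht0, hemb0⟩ := IH hpw' c hc
      refine ⟨p0, ⟨List.mem_append.2 (Or.inl hw0.1), ?_⟩, ht0, hemb0⟩
      intro r hr htr
      rcases List.mem_append.1 hr with hr | hr
      · exact hw0.2 r hr htr
      · have : r = q := by simpa using hr
        subst this
        exact absurd (htr.trans ht0) ht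

lemma find?_iff_winner (sE : List (Int × List (String × String)))
    (hst : sE.Pairwise (pvBeats (fun z => pvKey z.2) (fun z => z.1)))
    (p : Int × List (String × String)) :
    sE.find? (fun q => pvTitle q.2 == pvTitle p.2) = some p ↔ pvWinner p sE := by
  constructor
  · intro hf
    rcases List.find?_eq_some_iff_append.1 hf with ⟨-, as, bs, rfl, has⟩
    refine ⟨List.mem_append.2 (Or.inr (List.mem_cons_self ..)), ?_⟩
    intro q hq htq
    rcases List.mem_append.1 hq with hq | hq
    · exact absurd (by simpa using htq) (by simpa using has q hq)
    · rcases List.mem_cons.1 hq with rfl | hq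
      · exact Or.inl rfl
      · have := (List.pairwise_append.1 hst).2.1
        rw [List.pairwise_cons] at this
        exact Or.inr (this.1 q hq)
  · intro hw
    have hex : (sE.find? (fun q => pvTitle q.2 == pvTitle p.2)).isSome := by
      rw [List.find?_isSome]
      exact ⟨p, hw.1, by simp⟩
    rcases Option.isSome_iff_exists.1 hex with ⟨p0, hp0⟩
    rcases List.find?_eq_some_iff_append.1 hp0 with ⟨hpr, as, bs, heq, has⟩
    have hp0mem : p0 ∈ sE := by rw [heq]; exact List.mem_append.2 (Or.inr (List.mem_cons_self ..))
    have ht0 : pvTitle p0.2 = pvTitle p.2 := by simpa using hpr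
    rcases hw.2 p0 hp0mem ht0 with rfl | hb
    · exact hp0
    · -- p strictly after p0 in sE, so p0 beats p: contradiction with p beats p0
      have hpmem : p ∈ sE := hw.1
      rw [heq] at hpmem
      rcases List.mem_append.1 hpmem with hp | hp
      · exact absurd (by simpa using ht0.symm) (by simpa using has p hp)
      · rcases List.mem_cons.1 hp with rfl | hp
        · exact hp0
        · rw [heq] at hst
          have := (List.pairwise_append.1 hst).2.1
          rw [List.pairwise_cons] at this
          exact absurd (this.1 p hp) (fun h => pvBeats_asymm _ _ _ _ hb h)

-- ===== VERDICT (by name: the statement is the Claim_ definition above) =====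
set_option maxHeartbeats 2000000 in
theorem filter_news_spec : Claim_equal_filter_news := by
  intro l _hdom _hpre
  show filter_news l = filter_news_alt l
  by_cases hnil : l = []
  · subst hnil; rfl
  rw [filter_news, filter_news_alt, if_neg hnil, if_neg hnil]
  dsimp only
  -- ===== A side =====
  -- move the sort into the enumerated world
  have h1 := sorted_rev_map Prod.snd pvKey (PySem.List.enumerate l 0)
  rw [PySem.List.map_snd_enumerate] at h1
  -- h1 : (sorted (enumerate l) (fun e : Int × List (String × String) => pvKey e.2) true).map Prod.snd = sorted l pvKey true
  set sE := PySem.List.sorted (PySem.List.enumerate l 0) (fun e : Int × List (String × String) => pvKey e.2) true with hsE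
  have hstab : sE.Pairwise (pvBeats (fun z => pvKey z.2) (fun z => z.1)) :=
    sorted_rev_stable (fun e : Int × List (String × String) => pvKey e.2) (fun z => z.1) _ (PySem.List.pairwise_lt_enumerate l 0)
  have hpermE : sE.Perm (PySem.List.enumerate l 0) := PySem.List.sorted_perm _ _ _
  set pickE := pvPick (fun p => pvTitle (Prod.snd p)) [] sE with hpickE
  have hA : ((PySem.List.sorted l (fun a => pvKey a) true).foldl
      (fun d n => if d.contains (pvTitle n) then d else d.insert (pvTitle n) n)
      PySem.Dict.empty).items = (pickE.map Prod.snd).map (fun n => (pvTitle n, n)) := by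
    rw [foldA_items]
    have hemp : (PySem.Dict.empty : PySem.Dict String (List (String × String))).items = []
        ∧ (PySem.Dict.empty : PySem.Dict String (List (String × String))).keys = [] := ⟨rfl, rfl⟩
    rw [hemp.1, hemp.2]
    have : PySem.List.sorted l (fun a => pvKey a) true = sE.map Prod.snd := h1.symm
    rw [this, pick_map, List.map_map]
    exact List.nil_append _
  -- ===== B side =====
  set dB := (PySem.List.enumerate l).foldl
      (fun (d : PySem.Dict String (List Char × Int × List (String × String))) p =>
        match d.get? (pvTitle p.2) with
        | none => d.insert (pvTitle p.2) (pvKey p.2, p.1, p.2)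
        | some cur => if cur.1 < pvKey p.2 then d.insert (pvTitle p.2) (pvKey p.2, p.1, p.2) else d)
      PySem.Dict.empty with hdB
  have hget : ∀ T, dB.get? T = pvBestOf (PySem.List.enumerate l 0) T := by
    intro T
    rw [hdB, foldB_get?]
    rfl
  have hkeys : dB.keys = PySem.Set.ofList ((PySem.List.enumerate l 0).map (fun p => pvTitle p.2)) := by
    rw [hdB, foldB_keys]
    rfl
  have hknd : dB.keys.Nodup := by rw [hkeys]; exact PySem.Set.nodup_ofList _
  have hvals : dB.values = dB.keys.map (fun k => dB.getD k ([], 0, [])) :=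
    PySem.Dict.values_eq_map_keys dB hknd ([], 0, [])
  have hpwE : (PySem.List.enumerate l 0).Pairwise (fun a b => a.1 < b.1) :=
    PySem.List.pairwise_lt_enumerate l 0
  -- every key holds the winner of its title group
  have hgetDT : ∀ T ∈ dB.keys, ∃ p, pvWinner p (PySem.List.enumerate l 0) ∧
      pvTitle p.2 = T ∧ dB.getD T ([], 0, []) = pvEmb p := by
    intro T hT
    rw [hkeys] at hT
    have hT' : T ∈ (PySem.List.enumerate l 0).map (fun p => pvTitle p.2) :=
      (PySem.Set.mem_ofList _ _).1 hT
    rcases List.mem_map.1 hT' with ⟨p0, hp0, rfl⟩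
    rcases hb : pvBestOf (PySem.List.enumerate l 0) (pvTitle p0.2) with _ | c
    · exact absurd rfl (bestOf_none _ _ hb p0 hp0)
    · rcases bestOf_spec _ _ hpwE c hb with ⟨p, hw, htp, rfl⟩
      refine ⟨p, hw, htp, ?_⟩
      rw [PySem.Dict.getD_eq_get?_getD, hget, hb]
      rfl
  -- membership characterisation of dB.values
  have hvmem : ∀ x, x ∈ dB.values ↔
      ∃ p, pvWinner p (PySem.List.enumerate l 0) ∧ x = pvEmb p := by
    intro x
    rw [hvals]
    constructor
    · intro hx
      rcases List.mem_map.1 hx with ⟨T, hT, rfl⟩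
      rcases hgetDT T hT with ⟨p, hw, -, hgd⟩
      exact ⟨p, hw, hgd⟩
    · rintro ⟨p, hw, rfl⟩
      have hT : pvTitle p.2 ∈ dB.keys := by
        rw [hkeys]
        exact (PySem.Set.mem_ofList _ _).2 (List.mem_map.2 ⟨p, hw.1, rfl⟩)
      rcases hgetDT _ hT with ⟨p', hw', htp', hgd⟩
      have : p' = p := pvWinner_unique p' p _ hw' hw htp'
      subst this
      exact List.mem_map.2 ⟨pvTitle p'.2, hT, hgd⟩
  -- injectivity of indices over the enumeration
  have hinj : ∀ p ∈ PySem.List.enumerate l 0, ∀ q ∈ PySem.List.enumerate l 0,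
      p.1 = q.1 → p = q := by
    have hnd : ((PySem.List.enumerate l 0).map (fun p => p.1)).Nodup :=
      List.pairwise_map.2 (hpwE.imp (fun h => ne_of_lt h))
    exact fun p hp q hq h => List.inj_on_of_nodup_map hnd hp hq h
  -- values are nodup, with nodup indices
  have hvnd : dB.values.Nodup := by
    rw [hvals]
    refine List.Nodup.map_on ?_ hknd
    intro T hT T' hT' hEq
    rcases hgetDT T hT with ⟨p, -, htp, hgd⟩
    rcases hgetDT T' hT' with ⟨p', -, htp', hgd'⟩
    rw [hgd, hgd'] at hEq
    have : p = p' := by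
      have := congrArg (fun z => z.2.2) hEq
      have h1 := congrArg (fun z => z.2.1) hEq
      exact Prod.ext h1 this
    rw [← htp, ← htp', this]
  have hvidx : (dB.values.map (fun x => x.2.1)).Nodup := by
    rw [hvals, List.map_map]
    refine List.Nodup.map_on ?_ hknd
    intro T hT T' hT' hEq
    rcases hgetDT T hT with ⟨p, hw, htp, hgd⟩
    rcases hgetDT T' hT' with ⟨p', hw', htp', hgd'⟩
    simp only [Function.comp, hgd, hgd'] at hEq
    have : p = p' := hinj p hw.1 p' hw'.1 hEq
    rw [← htp, ← htp', this]
  -- the two sorts on the B side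
  set byIdx := PySem.List.sorted dB.values (fun p => p.2.1) false with hbyIdx
  have hbiperm : byIdx.Perm dB.values := PySem.List.sorted_perm _ _ _
  have hbile : byIdx.Pairwise (fun a b => a.2.1 ≤ b.2.1) := PySem.List.sorted_pairwise _ _
  have hbine : byIdx.Pairwise (fun a b => a.2.1 ≠ b.2.1) := by
    have : (byIdx.map (fun x => x.2.1)).Nodup := ((hbiperm.map _).nodup_iff).2 hvidx
    exact List.pairwise_map.1 this
  have hbilt : byIdx.Pairwise (fun a b => a.2.1 < b.2.1) :=
    (hbile.and hbine).imp (fun h => lt_of_le_of_ne h.1 h.2)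
  set kept := PySem.List.sorted byIdx (fun p => p.1) true with hkept
  have hkpw : kept.Pairwise (pvBeats (fun z => z.1) (fun z => z.2.1)) :=
    sorted_rev_stable _ _ _ hbilt
  have hkperm : kept.Perm dB.values := (PySem.List.sorted_perm _ _ _).trans hbiperm
  -- ===== comparing the two sides =====
  set LA := pickE.map pvEmb with hLA
  have hpksub : pickE.Sublist sE := pick_sublist _ sE []
  have hLApw : LA.Pairwise (pvBeats (fun z => z.1) (fun z => z.2.1)) := by
    rw [hLA, List.pairwise_map]
    exact (hstab.sublist hpksub).imp (fun h => h)
  have hLAnd : LA.Nodup := by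
    refine List.Nodup.map ?_ (List.Nodup.of_map (fun p => pvTitle p.2) (pick_map_nodup _ sE []).1)
    intro p q h
    have h1 := congrArg (fun z => z.2.1) h
    have h2 := congrArg (fun z => z.2.2) h
    exact Prod.ext h1 h2
  have hLAmem : ∀ x, x ∈ LA ↔
      ∃ p, pvWinner p (PySem.List.enumerate l 0) ∧ x = pvEmb p := by
    intro x
    rw [hLA]
    constructor
    · intro hx
      rcases List.mem_map.1 hx with ⟨p, hp, rfl⟩
      have := (mem_pick_iff _ sE [] p).1 hp
      exact ⟨p, pvWinner_perm hpermE p ((find?_iff_winner sE hstab p).1 this.2), rfl⟩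
    · rintro ⟨p, hw, rfl⟩
      refine List.mem_map.2 ⟨p, ?_, rfl⟩
      rw [mem_pick_iff]
      exact ⟨by simp, (find?_iff_winner sE hstab p).2 (pvWinner_perm hpermE.symm p hw)⟩
  have hperm : kept.Perm LA := by
    refine hkperm.trans ((List.perm_ext_iff_of_nodup hvnd hLAnd).2 ?_)
    intro a
    rw [hvmem, hLAmem]
  have hEQ : kept = LA := by
    refine List.Perm.eq_of_pairwise ?_ hkpw hLApw hperm
    intro a b _ _ h h'
    exact absurd h' (fun h' => pvBeats_asymm _ _ _ _ h h')
  -- conclude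
  rw [hA, hEQ, hLA, List.map_map, List.map_map, List.map_map]
  rfl
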